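-- pv_equiv track=rewrite | github.com/matthewdeanmartin/ai_shell | ai_shell/patch_tool.py | _extract_files_from_patch
-- ===== SOURCE A (Python) =====
-- def _extract_files_from_patch(patch_content: str) -> set[str]:
--     """
--     Extract file names from the patch content.
--
--     Args:
--         patch_content (str): The content of the git patch.
--
--     Returns:
--         set[str]: A set of file names extracted from the patch.
--     """
--     file_names = set()
--     lines = patch_content.split("\n")
--
--     for line in lines:
--         if line.startswith("--- a/") or line.startswith("+++ b/"):
--             # Extract the file name and add it to the set
--             parts = line.split()
--             if len(parts) > 1:
--                 file_name = parts[1]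
--                 if file_name.startswith("a/") or file_name.startswith("b/"):
--                     file_name = file_name[2:]
--                 file_names.add(file_name)
--
--     return file_names
-- ===== SOURCE B (Python) =====
-- def _extract_files_from_patch(patch_content: str) -> set[str]:
--     """Single forward scan over the string (no line list, no per-line split):
--     at each line start, match a patch header prefix literally and capture the
--     following run of non-whitespace characters."""
--     file_names = set()
--     i, n = 0, len(patch_content)
--     while i <= n:
--         if patch_content.startswith("--- a/", i) or patch_content.startswith("+++ b/", i):
--             j = i + 6
--             k = j
--             while k < n and not patch_content[k].isspace():
--                 k += 1
--             file_names.add(patch_content[j:k])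
--         nl = patch_content.find("\n", i)
--         if nl == -1:
--             break
--         i = nl + 1
--     return file_names
-- ===== Notes on version B (the rewrite author's own statement) =====
-- stated objective: simpler
-- what changed: Replaced A's split-into-a-line-list plus per-line whitespace str.split() and token slicing by a single index-based forward scan that matches the '--- a/'/'+++ b/' header literally at each line start and captures the following non-whitespace run directly.
import Mathlib
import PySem

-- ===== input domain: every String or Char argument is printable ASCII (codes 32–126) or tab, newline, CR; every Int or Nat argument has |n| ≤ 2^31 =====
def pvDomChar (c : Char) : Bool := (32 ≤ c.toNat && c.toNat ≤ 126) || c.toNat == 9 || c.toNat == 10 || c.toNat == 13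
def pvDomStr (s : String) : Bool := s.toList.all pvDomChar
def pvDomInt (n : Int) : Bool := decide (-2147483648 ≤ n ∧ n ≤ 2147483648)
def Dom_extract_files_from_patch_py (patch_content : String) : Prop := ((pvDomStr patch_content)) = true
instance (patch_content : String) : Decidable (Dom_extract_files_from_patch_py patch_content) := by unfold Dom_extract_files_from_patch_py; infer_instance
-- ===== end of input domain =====

-- B replaces A's split-into-lines + per-line str.split() parsing by one forward scan
-- over the string that matches the two patch-header prefixes at each line start (objective: simpler).

-- ===== PORT A =====
def extract_files_from_patch_py (patch_content : String) : List String :=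
  let lines := (PySem.Chars.splitOn patch_content.toList "\n".toList).map String.ofList
  lines.foldl
    (fun file_names line =>
      if PySem.Str.startswith line "--- a/" || PySem.Str.startswith line "+++ b/" then
        let parts := PySem.Str.split₀ line
        if parts.length > 1 then
          let file_name := parts[1]!
          let file_name :=
            if PySem.Str.startswith file_name "a/" || PySem.Str.startswith file_name "b/" then
              PySem.Str.slice file_name (some 2) none
            else file_name
          PySem.Set.add file_names file_name
        else file_names
      else file_names)
    PySem.Set.empty

-- ===== PORT B =====
-- Source B's loop index i (always a line start) is ported as recursion on the suffix of the
-- character list starting at i; find("...", i) == -1 becomes dropWhile = [] (exact port).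
def pvHit (cs : List Char) : List String :=
  if "--- a/".toList.isPrefixOf cs || "+++ b/".toList.isPrefixOf cs then
    [String.ofList ((cs.drop 6).takeWhile (fun c => !PySem.Chars.isspace c))]
  else []

def pvScan (cs : List Char) : List String :=
  let rest := cs.dropWhile (fun c => c != '\n')
  if hrest : rest = [] then pvHit cs
  else pvHit cs ++ pvScan rest.tail
termination_by cs.length
decreasing_by
  have h1 := List.length_dropWhile_le (fun c => c != '\n') cs
  have h3 : 0 < (cs.dropWhile (fun c => c != '\n')).length := List.length_pos_of_ne_nil hrest
  simp only [List.length_tail]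
  omega

def extract_files_from_patch_py_alt (patch_content : String) : List String :=
  PySem.Set.ofList (pvScan patch_content.toList)

-- ===== PRECONDITION & SPEC =====
def Spec_extract_files_from_patch_py (patch_content : String) (out : List String) : Prop := out = extract_files_from_patch_py_alt patch_content
instance (patch_content : String) (out : List String) : Decidable (Spec_extract_files_from_patch_py patch_content out) := by unfold Spec_extract_files_from_patch_py; infer_instance

-- ===== CLAIM (what is proved, stated in full; the proofs are below) =====
def Claim_equal_extract_files_from_patch_py : Prop := ∀ (patch_content : String), Dom_extract_files_from_patch_py patch_content → Spec_extract_files_from_patch_py patch_content (extract_files_from_patch_py patch_content)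


-- ===== LEMMAS AND PROOFS =====

-- the loop body of port A, named for the proofs (syntactically the lambda of the port)
def pvStepA (file_names : PySem.Set String) (line : String) : PySem.Set String :=
  if PySem.Str.startswith line "--- a/" || PySem.Str.startswith line "+++ b/" then
    let parts := PySem.Str.split₀ line
    if parts.length > 1 then
      let file_name := parts[1]!
      let file_name :=
        if PySem.Str.startswith file_name "a/" || PySem.Str.startswith file_name "b/" then
          PySem.Str.slice file_name (some 2) none
        else file_name
      PySem.Set.add file_names file_name
    else file_names
  else file_names

-- accumulator lemma for Python str.split()'s worker
lemma pv_go_acc : ∀ (cs cur : List Char) (acc : List (List Char)),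
    PySem.Chars.split₀.go cs cur acc = acc.reverse ++ PySem.Chars.split₀.go cs cur [] := by
  intro cs
  induction cs with
  | nil =>
    intro cur acc
    simp only [PySem.Chars.split₀.go]
    split_ifs <;> simp
  | cons c rest ih =>
    intro cur acc
    simp only [PySem.Chars.split₀.go]
    split_ifs with h1 h2
    · rw [ih [] acc]
    · rw [ih [] (cur.reverse :: acc), ih [] [cur.reverse]]
      simp
    · rw [ih (c :: cur) acc]

-- a word in progress: str.split() yields it up to the next whitespace, then the rest
lemma pv_go_tok : ∀ (cs cur : List Char), cur ≠ [] →
    PySem.Chars.split₀.go cs cur [] =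
      (cur.reverse ++ cs.takeWhile (fun c => !PySem.Chars.isspace c)) ::
        PySem.Chars.split₀ (cs.dropWhile (fun c => !PySem.Chars.isspace c)) := by
  intro cs
  induction cs with
  | nil =>
    intro cur hcur
    simp only [PySem.Chars.split₀.go]
    simp [List.isEmpty_iff, hcur, PySem.Chars.split₀, PySem.Chars.split₀.go]
  | cons c rest ih =>
    intro cur hcur
    by_cases hs : PySem.Chars.isspace c = true
    · simp only [PySem.Chars.split₀.go, hs, if_true, List.isEmpty_iff, hcur, if_false]
      rw [pv_go_acc]
      simp only [List.takeWhile_cons, List.dropWhile_cons, hs, Bool.not_true]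
      simp [PySem.Chars.split₀, PySem.Chars.split₀.go, hs]
    · simp only [PySem.Chars.split₀.go, hs, if_false]
      rw [ih (c :: cur) (by simp)]
      simp only [List.takeWhile_cons, List.dropWhile_cons, hs, Bool.not_false]
      simp

lemma pv_splitA (tail : List Char) :
    PySem.Chars.split₀ ('-' :: '-' :: '-' :: ' ' :: 'a' :: '/' :: tail) =
      ['-','-','-'] :: ('a' :: '/' :: tail.takeWhile (fun c => !PySem.Chars.isspace c)) ::
        PySem.Chars.split₀ (tail.dropWhile (fun c => !PySem.Chars.isspace c)) := by
  have hd : PySem.Chars.isspace '-' = false := by decide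
  have hsp : PySem.Chars.isspace ' ' = true := by decide
  have ha : PySem.Chars.isspace 'a' = false := by decide
  have hsl : PySem.Chars.isspace '/' = false := by decide
  show PySem.Chars.split₀.go _ [] [] = _
  simp [PySem.Chars.split₀.go, hd, hsp, ha, hsl]
  rw [pv_go_acc tail ['/', 'a'] [['-', '-', '-']], pv_go_tok tail ['/', 'a'] (by simp)]
  simp

lemma pv_splitB (tail : List Char) :
    PySem.Chars.split₀ ('+' :: '+' :: '+' :: ' ' :: 'b' :: '/' :: tail) =
      ['+','+','+'] :: ('b' :: '/' :: tail.takeWhile (fun c => !PySem.Chars.isspace c)) ::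
        PySem.Chars.split₀ (tail.dropWhile (fun c => !PySem.Chars.isspace c)) := by
  have hd : PySem.Chars.isspace '+' = false := by decide
  have hsp : PySem.Chars.isspace ' ' = true := by decide
  have ha : PySem.Chars.isspace 'b' = false := by decide
  have hsl : PySem.Chars.isspace '/' = false := by decide
  show PySem.Chars.split₀.go _ [] [] = _
  simp [PySem.Chars.split₀.go, hd, hsp, ha, hsl]
  rw [pv_go_acc tail ['/', 'b'] [['+', '+', '+']], pv_go_tok tail ['/', 'b'] (by simp)]
  simp

-- non-whitespace runs do not see the '\n' cut
lemma pv_tw (l : List Char) :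
    (l.takeWhile (fun c => c != '\n')).takeWhile (fun c => !PySem.Chars.isspace c) =
      l.takeWhile (fun c => !PySem.Chars.isspace c) := by
  rw [List.takeWhile_takeWhile]
  congr 1
  funext c
  by_cases hs : PySem.Chars.isspace c = true
  · simp [hs]
  · have hne : c ≠ '\n' := by rintro rfl; exact hs (by decide)
    simp [hs, hne]

-- accumulator lemma for str.split("\n")'s worker
lemma pv_spOn_acc : ∀ (l : List Char) (fuel : Nat) (cur : List Char) (acc : List (List Char)),
    PySem.Chars.splitOn.go ['\n'] fuel l cur acc =
      acc.reverse ++ PySem.Chars.splitOn.go ['\n'] fuel l cur [] := by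
  intro l
  induction l with
  | nil =>
    intro fuel cur acc
    cases fuel <;> simp [PySem.Chars.splitOn.go]
  | cons c rest ih =>
    intro fuel cur acc
    cases fuel with
    | zero => simp [PySem.Chars.splitOn.go]
    | succ fuel =>
      simp only [PySem.Chars.splitOn.go]
      split_ifs with h1
      · rw [show List.drop (['\n'] : List Char).length (c :: rest) = rest from rfl]
        rw [ih fuel [] (cur.reverse :: acc), ih fuel [] [cur.reverse]]
        simp
      · rw [ih fuel (c :: cur) acc]

-- str.split("\n") = the current piece up to '\n', then the split of the remainder
lemma pv_spOn : ∀ (l : List Char) (fuel : Nat) (cur : List Char), l.length < fuel →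
    PySem.Chars.splitOn.go ['\n'] fuel l cur [] =
      (cur.reverse ++ l.takeWhile (fun c => c != '\n')) ::
        (match l.dropWhile (fun c => c != '\n') with
         | [] => []
         | _ :: t => PySem.Chars.splitOn t ['\n']) := by
  intro l
  induction l with
  | nil =>
    intro fuel cur hf
    cases fuel with
    | zero => omega
    | succ fuel => simp [PySem.Chars.splitOn.go]
  | cons c rest ih =>
    intro fuel cur hf
    cases fuel with
    | zero => omega
    | succ fuel =>
      have hf' : rest.length < fuel := by simp at hf; omega
      by_cases hc : c = '\n'
      · subst hc
        have hpre : List.isPrefixOf ['\n'] ('\n' :: rest) = true := by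
          simp [List.isPrefixOf]
        have hsp := (show PySem.Chars.splitOn rest ['\n'] =
            PySem.Chars.splitOn.go ['\n'] (rest.length + 1) rest [] [] from rfl).trans
          (ih (rest.length + 1) [] (by omega))
        simp only [PySem.Chars.splitOn.go, hpre, if_true]
        rw [show List.drop (['\n'] : List Char).length ('\n' :: rest) = rest from rfl]
        rw [pv_spOn_acc, ih fuel [] hf']
        simp [hsp]
      · have hpre : List.isPrefixOf ['\n'] (c :: rest) = false := by
          simpa [List.isPrefixOf] using Ne.symm hc
        simp only [PySem.Chars.splitOn.go, hpre, Bool.false_eq_true, if_false]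
        rw [ih fuel (c :: cur) hf']
        simp [hc]

lemma pv_splitOn_eq (cs : List Char) :
    PySem.Chars.splitOn cs ['\n'] =
      (cs.takeWhile (fun c => c != '\n')) ::
        (match cs.dropWhile (fun c => c != '\n') with
         | [] => []
         | _ :: t => PySem.Chars.splitOn t ['\n']) := by
  rw [show PySem.Chars.splitOn cs ['\n'] =
    PySem.Chars.splitOn.go ['\n'] (cs.length + 1) cs [] [] from rfl,
    pv_spOn cs (cs.length + 1) [] (by omega)]
  simp

-- one line of A's loop = the hit list of B's scan step
lemma pv_step_eq (cs : List Char) (s : PySem.Set String) :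
    pvStepA s (String.ofList (cs.takeWhile (fun c => c != '\n'))) =
      (pvHit cs).foldl PySem.Set.add s := by
  have eA : "--- a/".toList = ['-','-','-',' ','a','/'] := rfl
  have eB : "+++ b/".toList = ['+','+','+',' ','b','/'] := rfl
  by_cases hA : List.isPrefixOf "--- a/".toList cs = true
  · obtain ⟨tail, rfl⟩ := List.isPrefixOf_iff_prefix.mp hA
    rw [eA]
    have htake : ((['-','-','-',' ','a','/'] ++ tail).takeWhile (fun c => c != '\n')) =
        '-' :: '-' :: '-' :: ' ' :: 'a' :: '/' :: tail.takeWhile (fun c => c != '\n') := by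
      simp [List.takeWhile_cons]
    rw [htake]
    simp only [pvStepA, PySem.Str.startswith_eq, PySem.Chars.startswith,
      String.toList_ofList, pvHit, eA, eB]
    have hpre : List.isPrefixOf ['-','-','-',' ','a','/']
        ('-' :: '-' :: '-' :: ' ' :: 'a' :: '/' :: tail.takeWhile (fun c => c != '\n')) = true := by
      simp [List.isPrefixOf]
    have hpre2 : List.isPrefixOf ['-','-','-',' ','a','/']
        (['-','-','-',' ','a','/'] ++ tail) = true := by
      simp [List.isPrefixOf]
    rw [hpre, hpre2]
    simp only [Bool.true_or, if_true]
    rw [show PySem.Str.split₀ (String.ofList ('-' :: '-' :: '-' :: ' ' :: 'a' :: '/' :: tail.takeWhile (fun c => c != '\n'))) =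
      (PySem.Chars.split₀ ('-' :: '-' :: '-' :: ' ' :: 'a' :: '/' :: tail.takeWhile (fun c => c != '\n'))).map String.ofList from by
        simp [PySem.Str.split₀]]
    rw [pv_splitA, pv_tw]
    simp only [List.map_cons, List.length_cons, List.getElem!_cons_succ, List.getElem!_cons_zero]
    rw [if_pos (by omega)]
    have ea2 : "a/".toList = ['a', '/'] := rfl
    have eb2 : "b/".toList = ['b', '/'] := rfl
    have hdrop : List.drop 6 (['-','-','-',' ','a','/'] ++ tail) = tail := rfl
    have hsl2 : PySem.Str.slice (String.ofList ('a' :: '/' :: tail.takeWhile (fun c => !PySem.Chars.isspace c))) (some 2) none =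
        String.ofList (tail.takeWhile (fun c => !PySem.Chars.isspace c)) := by
      simp [PySem.Str.slice, PySem.List.slice_from _ (by norm_num : (0:Int) ≤ 2)]
    simp [ea2, eb2, hdrop, hsl2, List.isPrefixOf]
  · by_cases hB : List.isPrefixOf "+++ b/".toList cs = true
    · obtain ⟨tail, rfl⟩ := List.isPrefixOf_iff_prefix.mp hB
      have hAf : List.isPrefixOf "--- a/".toList ("+++ b/".toList ++ tail) = false :=
        Bool.eq_false_iff.mpr hA
      rw [eB]
      rw [eA, eB] at hAf
      have htake : ((['+','+','+',' ','b','/'] ++ tail).takeWhile (fun c => c != '\n')) =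
          '+' :: '+' :: '+' :: ' ' :: 'b' :: '/' :: tail.takeWhile (fun c => c != '\n') := by
        simp [List.takeWhile_cons]
      rw [htake]
      simp only [pvStepA, PySem.Str.startswith_eq, PySem.Chars.startswith,
        String.toList_ofList, pvHit, eA, eB]
      have hpre : List.isPrefixOf ['+','+','+',' ','b','/']
          ('+' :: '+' :: '+' :: ' ' :: 'b' :: '/' :: tail.takeWhile (fun c => c != '\n')) = true := by
        simp [List.isPrefixOf]
      have hpre2 : List.isPrefixOf ['+','+','+',' ','b','/']
          (['+','+','+',' ','b','/'] ++ tail) = true := by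
        simp [List.isPrefixOf]
      have hpre3 : List.isPrefixOf ['-','-','-',' ','a','/']
          ('+' :: '+' :: '+' :: ' ' :: 'b' :: '/' :: tail.takeWhile (fun c => c != '\n')) = false := by
        simp [List.isPrefixOf]
      rw [hpre, hpre2, hpre3, hAf]
      simp only [Bool.or_true, Bool.false_or, if_true]
      rw [show PySem.Str.split₀ (String.ofList ('+' :: '+' :: '+' :: ' ' :: 'b' :: '/' :: tail.takeWhile (fun c => c != '\n'))) =
        (PySem.Chars.split₀ ('+' :: '+' :: '+' :: ' ' :: 'b' :: '/' :: tail.takeWhile (fun c => c != '\n'))).map String.ofList from by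
          simp [PySem.Str.split₀]]
      rw [pv_splitB, pv_tw]
      simp only [List.map_cons, List.length_cons, List.getElem!_cons_succ, List.getElem!_cons_zero]
      rw [if_pos (by omega)]
      have ea2 : "a/".toList = ['a', '/'] := rfl
      have eb2 : "b/".toList = ['b', '/'] := rfl
      have hdrop : List.drop 6 (['+','+','+',' ','b','/'] ++ tail) = tail := rfl
      have hsl2 : PySem.Str.slice (String.ofList ('b' :: '/' :: tail.takeWhile (fun c => !PySem.Chars.isspace c))) (some 2) none =
          String.ofList (tail.takeWhile (fun c => !PySem.Chars.isspace c)) := by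
        simp [PySem.Str.slice, PySem.List.slice_from _ (by norm_num : (0:Int) ≤ 2)]
      simp [ea2, eb2, hdrop, hsl2, List.isPrefixOf]
    · -- no header at this line start: both sides leave the set unchanged
      have hA2 : ¬ (['-','-','-',' ','a','/'] <+: cs) := fun h =>
        hA (by rw [eA]; exact List.isPrefixOf_iff_prefix.mpr h)
      have hB2 : ¬ (['+','+','+',' ','b','/'] <+: cs) := fun h =>
        hB (by rw [eB]; exact List.isPrefixOf_iff_prefix.mpr h)
      have hA2' : ¬ (['-','-','-',' ','a','/'] <+: cs.takeWhile (fun c => c != '\n')) :=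
        fun h => hA2 (h.trans (List.takeWhile_prefix _))
      have hB2' : ¬ (['+','+','+',' ','b','/'] <+: cs.takeWhile (fun c => c != '\n')) :=
        fun h => hB2 (h.trans (List.takeWhile_prefix _))
      simp [pvStepA, PySem.Str.startswith_eq, PySem.Chars.startswith, pvHit, eA, eB,
        hA2, hB2, hA2', hB2']

lemma pv_main : ∀ (n : Nat) (cs : List Char), cs.length ≤ n → ∀ (s : PySem.Set String),
    ((PySem.Chars.splitOn cs ['\n']).map String.ofList).foldl pvStepA s =
      (pvScan cs).foldl PySem.Set.add s := by
  intro n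
  induction n with
  | zero =>
    intro cs hl s
    have hcs : cs = [] := List.length_eq_zero_iff.mp (Nat.le_zero.mp hl)
    subst hcs
    rw [pv_splitOn_eq, pvScan]
    simp only [List.dropWhile_nil, List.takeWhile_nil, dif_pos rfl,
      List.map_cons, List.map_nil, List.foldl_cons, List.foldl_nil]
    exact pv_step_eq [] s
  | succ n ih =>
    intro cs hl s
    rw [pv_splitOn_eq, pvScan]
    cases hd : cs.dropWhile (fun c => c != '\n') with
    | nil =>
      simp only [hd, dif_pos rfl, List.map_cons, List.map_nil, List.foldl_cons, List.foldl_nil]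
      exact pv_step_eq cs s
    | cons c t =>
      rw [dif_neg (List.cons_ne_nil c t)]
      simp only [hd, List.map_cons, List.foldl_cons, List.tail_cons, List.foldl_append]
      rw [pv_step_eq cs s]
      apply ih
      have h1 := List.length_dropWhile_le (fun c => c != '\n') cs
      rw [hd] at h1
      simp at h1
      omega

-- ===== VERDICT (by name: the statement is the Claim_ definition above) =====
theorem extract_files_from_patch_py_spec : Claim_equal_extract_files_from_patch_py := by
  intro patch_content _
  show extract_files_from_patch_py patch_content = extract_files_from_patch_py_alt patch_content
  unfold extract_files_from_patch_py extract_files_from_patch_py_alt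
  rw [show ("\n".toList : List Char) = ['\n'] from rfl]
  exact pv_main patch_content.toList.length patch_content.toList le_rfl PySem.Set.empty
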